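-- pv_equiv track=rewrite | github.com/ahmadazim/DiffuGene | src/DiffuGene/generate/generate.py | make_token_offsets
-- ===== SOURCE A (Python) =====
-- from typing import Dict, List, Optional, Tuple
--
-- def make_token_offsets(chr_to_tokens: Dict[int, int]) -> Dict[int, Tuple[int, int]]:
--     offsets: Dict[int, Tuple[int, int]] = {}
--     start = 0
--     for chrom in sorted(chr_to_tokens.keys()):
--         n_tokens = int(chr_to_tokens[chrom])
--         offsets[chrom] = (start, start + n_tokens)
--         start += n_tokens
--     return offsets
-- ===== SOURCE B (Python) =====
-- def make_token_offsets(chr_to_tokens):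
--     def solve(keys):
--         # returns (offsets dict for these keys starting at 0, total token count)
--         if not keys:
--             return {}, 0
--         if len(keys) == 1:
--             k = keys[0]
--             n = int(chr_to_tokens[k])
--             return {k: (0, n)}, n
--         mid = len(keys) // 2
--         left, tl = solve(keys[:mid])
--         right, tr = solve(keys[mid:])
--         offsets = dict(left)
--         for k, (lo, hi) in right.items():
--             offsets[k] = (lo + tl, hi + tl)
--         return offsets, tl + tr
--
--     offsets, _ = solve(sorted(chr_to_tokens))
--     return offsets
-- ===== Notes on version B (the rewrite author's own statement) =====
-- stated objective: alternative
-- what changed: Replaces A's single sorted pass with a running accumulator by divide-and-conquer: solve each half of the sorted keys independently from offset 0, then shift the right half's ranges by the left half's total.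
import Mathlib
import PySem

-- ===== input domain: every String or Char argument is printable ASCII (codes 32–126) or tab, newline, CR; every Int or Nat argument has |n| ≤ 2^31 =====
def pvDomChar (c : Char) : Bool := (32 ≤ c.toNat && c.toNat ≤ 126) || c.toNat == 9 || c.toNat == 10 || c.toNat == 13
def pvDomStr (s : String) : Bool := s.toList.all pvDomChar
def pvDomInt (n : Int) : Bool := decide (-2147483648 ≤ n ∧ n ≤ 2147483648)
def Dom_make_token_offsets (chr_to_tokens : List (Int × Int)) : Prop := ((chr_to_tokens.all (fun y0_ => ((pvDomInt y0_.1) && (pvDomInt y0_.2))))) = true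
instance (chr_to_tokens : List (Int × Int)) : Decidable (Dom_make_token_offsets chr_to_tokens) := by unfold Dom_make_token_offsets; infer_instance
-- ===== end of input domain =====

-- B replaces A's single sorted pass with a running accumulator by divide-and-conquer on the sorted
-- key list (solve each half from 0, shift the right half by the left total); objective: alternative.

-- ===== PORT A =====
-- A: offsets = {}; start = 0; for chrom in sorted(d.keys()): offsets[chrom] = (start, start+n); start += n.
-- Keys inserted into `offsets` are distinct and fresh, so the dict loop appends: the fold carries (items, start).
def make_token_offsets (chr_to_tokens : List (Int × Int)) : List (Int × Int × Int) :=
  let d := PySem.Dict.ofList chr_to_tokens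
  ((PySem.List.sorted d.keys (fun k => k) false).foldl
    (fun (acc : List (Int × Int × Int) × Int) chrom =>
      let n_tokens := d.getD chrom 0   -- d[chrom]: chrom is a key of d, so the default is never used
      (acc.1 ++ [(chrom, acc.2, acc.2 + n_tokens)], acc.2 + n_tokens))
    ([], 0)).1

-- ===== PORT B =====
-- B's solve(keys): empty/singleton base cases, else split at len//2, solve both halves, shift the
-- right half's ranges by the left total. `offsets = dict(left)` then inserting the right keys: the
-- two halves of sorted(d) carry disjoint distinct keys, so the insertion loop appends the shifted
-- right items after the left items.
def pvSolveB (d : PySem.Dict Int Int) : List Int → List (Int × Int × Int) × Int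
  | [] => ([], 0)
  | [k] =>
      let n := d.getD k 0   -- chr_to_tokens[k]: k is a key of d, default never used
      ([(k, 0, n)], n)
  | k1 :: k2 :: rest =>
      let keys := k1 :: k2 :: rest
      let mid := keys.length / 2
      let left := pvSolveB d (keys.take mid)
      let right := pvSolveB d (keys.drop mid)
      (left.1 ++ right.1.map (fun p => (p.1, p.2.1 + left.2, p.2.2 + left.2)), left.2 + right.2)
  termination_by keys => keys.length
  decreasing_by
    · simp; omega
    · simp; omega

def make_token_offsets_alt (chr_to_tokens : List (Int × Int)) : List (Int × Int × Int) :=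
  let d := PySem.Dict.ofList chr_to_tokens
  (pvSolveB d (PySem.List.sorted d.keys (fun k => k) false)).1

-- ===== PRECONDITION & SPEC =====
def Spec_make_token_offsets (chr_to_tokens : List (Int × Int)) (out : List (Int × Int × Int)) : Prop := out = make_token_offsets_alt chr_to_tokens
instance (chr_to_tokens : List (Int × Int)) (out : List (Int × Int × Int)) : Decidable (Spec_make_token_offsets chr_to_tokens out) := by unfold Spec_make_token_offsets; infer_instance

-- ===== CLAIM (what is proved, stated in full; the proofs are below) =====
def Claim_equal_make_token_offsets : Prop := ∀ (chr_to_tokens : List (Int × Int)), Dom_make_token_offsets chr_to_tokens → Spec_make_token_offsets chr_to_tokens (make_token_offsets chr_to_tokens)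

-- ===== LEMMAS AND PROOFS =====

-- A's fold, unrolled: the offset rows for keys ks starting at s
def pvBuild (g : Int → Int) : List Int → Int → List (Int × Int × Int)
  | [], _ => []
  | k :: t, s => (k, s, s + g k) :: pvBuild g t (s + g k)

theorem pvA_foldl (g : Int → Int) (ks : List Int) (acc : List (Int × Int × Int)) (s : Int) :
    (ks.foldl (fun (acc : List (Int × Int × Int) × Int) k =>
        (acc.1 ++ [(k, acc.2, acc.2 + g k)], acc.2 + g k)) (acc, s)).1
      = acc ++ pvBuild g ks s := by
  induction ks generalizing acc s with
  | nil => simp [pvBuild]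
  | cons k t ih => simp [List.foldl, pvBuild, ih]

-- shifting all rows shifts the start
theorem pvBuild_shift (g : Int → Int) (ks : List Int) (s t : Int) :
    (pvBuild g ks s).map (fun p => (p.1, p.2.1 + t, p.2.2 + t)) = pvBuild g ks (s + t) := by
  induction ks generalizing s with
  | nil => simp [pvBuild]
  | cons k r ih =>
      simp only [pvBuild, List.map_cons, ih (s + g k)]
      rw [show s + g k + t = s + t + g k from by ring]

theorem pvBuild_append (g : Int → Int) (l r : List Int) (s : Int) :
    pvBuild g (l ++ r) s = pvBuild g l s ++ pvBuild g r (s + (l.map g).sum) := by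
  induction l generalizing s with
  | nil => simp [pvBuild]
  | cons k t ih =>
      simp only [List.cons_append, pvBuild, ih (s + g k), List.map_cons, List.sum_cons]
      rw [show s + g k + (List.map g t).sum = s + (g k + (List.map g t).sum) from by ring]

theorem pvSolveB_eq (d : PySem.Dict Int Int) (ks : List Int) :
    pvSolveB d ks = (pvBuild (fun k => d.getD k 0) ks 0, (ks.map (fun k => d.getD k 0)).sum) := by
  induction ks using pvSolveB.induct d with
  | case1 => simp [pvSolveB, pvBuild]
  | case2 k => simp [pvSolveB, pvBuild]
  | case3 k1 k2 rest keys mid ih1 ih2 =>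
      rw [pvSolveB, ih1, ih2]
      have hsplit : (k1 :: k2 :: rest) = keys.take mid ++ keys.drop mid :=
        (List.take_append_drop mid keys).symm
      simp only [Prod.mk.injEq]
      constructor
      · rw [pvBuild_shift]
        conv_rhs => rw [hsplit]
        rw [pvBuild_append]
      · conv_rhs => rw [hsplit]
        simp

theorem make_token_offsets_eq (l : List (Int × Int)) :
    make_token_offsets l = make_token_offsets_alt l := by
  unfold make_token_offsets make_token_offsets_alt
  simp only
  rw [pvA_foldl, pvSolveB_eq]
  simp

-- ===== VERDICT (by name: the statement is the Claim_ definition above) =====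
theorem make_token_offsets_spec : Claim_equal_make_token_offsets := by
  intro l _
  unfold Spec_make_token_offsets
  exact make_token_offsets_eq l
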